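-- pv_equiv track=rewrite | github.com/wallaceclwong/project-sentinel | src/win_rate_optimizer.py | _estimate_implementation_timeline
-- ===== SOURCE A (Python) =====
-- from typing import Dict, List, Tuple, Any
--
-- def _estimate_implementation_timeline(sorted_strategies: List[Tuple]) -> Dict[str, str]:
--     """Estimate implementation timeline for each strategy"""
--
--     timelines = {}
--     for name, result in sorted_strategies:
--         complexity = result.get("implementation", "")
--
--         if "confidence" in name.lower():
--             timelines[name] = "1-2 days (simple filter)"
--         elif "delta" in name.lower():
--             timelines[name] = "2-3 days (threshold tuning)"
--         elif "pattern" in name.lower():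
--             timelines[name] = "1 week (pattern recognition)"
--         elif "ensemble" in name.lower():
--             timelines[name] = "3-5 days (consensus logic)"
--         elif "timeframe" in name.lower():
--             timelines[name] = "1 week (multi-timeframe analysis)"
--         else:
--             timelines[name] = "3-5 days (custom implementation)"
--
--     return timelines
-- ===== SOURCE B (Python) =====
-- TIMELINE_TABLE = [
--     ("confidence", "1-2 days (simple filter)"),
--     ("delta", "2-3 days (threshold tuning)"),
--     ("pattern", "1 week (pattern recognition)"),
--     ("ensemble", "3-5 days (consensus logic)"),
--     ("timeframe", "1 week (multi-timeframe analysis)"),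
-- ]
--
-- def _estimate_implementation_timeline(sorted_strategies):
--     """Estimate implementation timeline for each strategy (staged overwrite passes)."""
--     # Pass 0: every strategy gets the default timeline.
--     timelines = {name: "3-5 days (custom implementation)" for name, _result in sorted_strategies}
--     # Then one pass per keyword, lowest priority first: a later (higher-priority)
--     # pass overwrites earlier assignments, so the highest-priority matching
--     # keyword wins — exactly the first match of the priority chain.
--     for keyword, timeline in reversed(TIMELINE_TABLE):
--         for name in timelines:
--             if keyword in name.lower():
--                 timelines[name] = timeline
--     return timelines
-- ===== Notes on version B (the rewrite author's own statement) =====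
-- stated objective: alternative
-- what changed: Instead of deciding each name's timeline with a per-name first-match chain, B works in staged passes over the whole dict: it first assigns every strategy the default timeline, then runs one overwrite pass per keyword in reverse priority order, so the highest-priority matching keyword's pass writes last and wins.
import Mathlib
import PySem

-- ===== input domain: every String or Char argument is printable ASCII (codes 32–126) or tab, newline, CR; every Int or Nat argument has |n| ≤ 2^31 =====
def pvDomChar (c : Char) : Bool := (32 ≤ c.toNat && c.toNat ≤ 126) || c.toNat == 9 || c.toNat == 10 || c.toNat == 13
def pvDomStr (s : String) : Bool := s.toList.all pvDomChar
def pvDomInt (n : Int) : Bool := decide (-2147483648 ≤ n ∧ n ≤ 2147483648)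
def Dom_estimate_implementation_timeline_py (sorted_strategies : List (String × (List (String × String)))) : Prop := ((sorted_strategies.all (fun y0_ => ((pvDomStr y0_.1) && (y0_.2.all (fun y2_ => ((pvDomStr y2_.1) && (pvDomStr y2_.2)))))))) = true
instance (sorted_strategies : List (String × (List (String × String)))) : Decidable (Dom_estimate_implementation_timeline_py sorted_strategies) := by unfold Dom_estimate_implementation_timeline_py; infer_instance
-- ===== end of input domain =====

-- B replaces A's per-name first-match if/elif chain by staged overwrite passes: default for all,
-- then one pass per keyword in reverse priority order so the highest-priority match writes last
-- (objective: alternative); same return value.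


-- ===== PORT A =====
-- Literal transliteration of A: dict built in a loop with an if/elif chain on name.lower().
def estimate_implementation_timeline_py (sorted_strategies : List (String × (List (String × String)))) : List (String × String) :=
  (sorted_strategies.foldl
    (fun (timelines : PySem.Dict String String) p =>
      let name := p.1
      let _complexity := PySem.Dict.getD (PySem.Dict.ofList p.2) "implementation" ""
      if PySem.Str.isIn "confidence" (PySem.Str.lower name) then
        timelines.insert name "1-2 days (simple filter)"
      else if PySem.Str.isIn "delta" (PySem.Str.lower name) then
        timelines.insert name "2-3 days (threshold tuning)"
      else if PySem.Str.isIn "pattern" (PySem.Str.lower name) then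
        timelines.insert name "1 week (pattern recognition)"
      else if PySem.Str.isIn "ensemble" (PySem.Str.lower name) then
        timelines.insert name "3-5 days (consensus logic)"
      else if PySem.Str.isIn "timeframe" (PySem.Str.lower name) then
        timelines.insert name "1 week (multi-timeframe analysis)"
      else
        timelines.insert name "3-5 days (custom implementation)")
    PySem.Dict.empty).items

-- ===== PORT B =====
-- B (from Source B): initialise every strategy to the default timeline, then run one overwrite
-- pass per keyword in reverse priority order; the last (highest-priority) matching pass wins.
def timelineTable : List (String × String) :=
  [("confidence", "1-2 days (simple filter)"),
   ("delta", "2-3 days (threshold tuning)"),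
   ("pattern", "1 week (pattern recognition)"),
   ("ensemble", "3-5 days (consensus logic)"),
   ("timeframe", "1 week (multi-timeframe analysis)")]

-- one pass: "for name in timelines: if keyword in name.lower(): timelines[name] = timeline"
def timelinePass (keyword timeline : String) (d : PySem.Dict String String) : PySem.Dict String String :=
  d.keys.foldl
    (fun d' name =>
      if PySem.Str.isIn keyword (PySem.Str.lower name) then d'.insert name timeline else d')
    d

def estimate_implementation_timeline_py_alt (sorted_strategies : List (String × (List (String × String)))) : List (String × String) :=
  let timelines0 := sorted_strategies.foldl
    (fun (d : PySem.Dict String String) p => d.insert p.1 "3-5 days (custom implementation)")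
    PySem.Dict.empty
  (timelineTable.reverse.foldl (fun d kv => timelinePass kv.1 kv.2 d) timelines0).items

-- ===== PRECONDITION & SPEC =====
def Spec_estimate_implementation_timeline_py (sorted_strategies : List (String × (List (String × String)))) (out : List (String × String)) : Prop := out = estimate_implementation_timeline_py_alt sorted_strategies
instance (sorted_strategies : List (String × (List (String × String)))) (out : List (String × String)) : Decidable (Spec_estimate_implementation_timeline_py sorted_strategies out) := by unfold Spec_estimate_implementation_timeline_py; infer_instance

-- ===== CLAIM (what is proved, stated in full; the proofs are below) =====
def Claim_equal_estimate_implementation_timeline_py : Prop := ∀ (sorted_strategies : List (String × (List (String × String)))), Dom_estimate_implementation_timeline_py sorted_strategies → Spec_estimate_implementation_timeline_py sorted_strategies (estimate_implementation_timeline_py sorted_strategies)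

-- ===== LEMMAS AND PROOFS =====

-- A's if/elif chain as a function of the name (proof-only helper).
def chainTimeline (name : String) : String :=
  if PySem.Str.isIn "confidence" (PySem.Str.lower name) then "1-2 days (simple filter)"
  else if PySem.Str.isIn "delta" (PySem.Str.lower name) then "2-3 days (threshold tuning)"
  else if PySem.Str.isIn "pattern" (PySem.Str.lower name) then "1 week (pattern recognition)"
  else if PySem.Str.isIn "ensemble" (PySem.Str.lower name) then "3-5 days (consensus logic)"
  else if PySem.Str.isIn "timeframe" (PySem.Str.lower name) then "1 week (multi-timeframe analysis)"
  else "3-5 days (custom implementation)"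

-- the pointwise effect of one pass on an items entry
def passEntry (keyword timeline : String) (p : String × String) : String × String :=
  if PySem.Str.isIn keyword (PySem.Str.lower p.1) = true then (p.1, timeline) else p

lemma pass_items_aux (keyword timeline : String) :
    ∀ (ks : List String) (d : PySem.Dict String String), ks.Nodup →
      (∀ k ∈ ks, d.contains k = true) →
      (ks.foldl
        (fun d' name =>
          if PySem.Str.isIn keyword (PySem.Str.lower name) then d'.insert name timeline else d')
        d).items
      = d.items.map (fun p =>
          if p.1 ∈ ks ∧ PySem.Str.isIn keyword (PySem.Str.lower p.1) = true then (p.1, timeline) else p) := by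
  intro ks
  induction ks with
  | nil => intro d _ _; simp
  | cons n rest ih =>
    intro d hnd hc
    simp only [List.foldl_cons]
    by_cases h : PySem.Str.isIn keyword (PySem.Str.lower n) = true
    · rw [if_pos h]
      have hcn : d.contains n = true := hc n (List.mem_cons_self ..)
      have hnr : n ∉ rest := (List.nodup_cons.1 hnd).1
      rw [ih (d.insert n timeline) (List.nodup_cons.1 hnd).2
          (fun k hk => by
            rw [PySem.Dict.contains_insert]
            simp [hc k (List.mem_cons_of_mem _ hk)])]
      rw [PySem.Dict.items_insert_of_contains _ _ hcn, List.map_map]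
      apply List.map_congr_left
      intro p _
      by_cases hp : p.1 = n
      · simp_all
      · by_cases hm : p.1 ∈ rest <;> simp_all
    · rw [if_neg h]
      rw [ih d (List.nodup_cons.1 hnd).2 (fun k hk => hc k (List.mem_cons_of_mem _ hk))]
      apply List.map_congr_left
      intro p _
      by_cases hp : p.1 = n
      · simp_all
      · by_cases hm : p.1 ∈ rest <;> simp_all

lemma pass_items (keyword timeline : String) (d : PySem.Dict String String)
    (hnd : d.keys.Nodup) :
    (timelinePass keyword timeline d).items = d.items.map (passEntry keyword timeline) := by
  unfold timelinePass
  rw [pass_items_aux keyword timeline d.keys d hnd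
      (fun k hk => (PySem.Dict.contains_iff_mem_keys d k).2 hk)]
  apply List.map_congr_left
  intro p hp
  have hk : p.1 ∈ d.keys := PySem.Dict.mem_keys_of_mem_items d hp
  unfold passEntry
  simp only [hk, true_and]

lemma passEntry_fst (keyword timeline : String) (p : String × String) :
    (passEntry keyword timeline p).1 = p.1 := by
  unfold passEntry; split_ifs <;> rfl

lemma pass_keys (keyword timeline : String) (d : PySem.Dict String String)
    (hnd : d.keys.Nodup) :
    (timelinePass keyword timeline d).keys = d.keys := by
  simp only [PySem.Dict.keys, pass_items keyword timeline d hnd, List.map_map]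
  apply List.map_congr_left
  intro p _
  exact passEntry_fst ..

-- A's insert-the-chain-value loop vs B's insert-the-default loop, on items.
lemma AB_items (f : String → String) (v0 : String) :
    ∀ (ss : List (String × (List (String × String)))) (dA dB : PySem.Dict String String),
      dA.items = dB.items.map (fun p => (p.1, f p.1)) →
      (ss.foldl (fun d p => d.insert p.1 (f p.1)) dA).items
        = (ss.foldl (fun d p => d.insert p.1 v0) dB).items.map (fun p => (p.1, f p.1)) := by
  intro ss
  induction ss with
  | nil => intro dA dB h; simpa using h
  | cons q rest ih =>
    intro dA dB h
    simp only [List.foldl_cons]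
    apply ih
    have hkeys : dA.keys = dB.keys := by
      simp only [PySem.Dict.keys, h, List.map_map]; rfl
    have hcont : dA.contains q.1 = dB.contains q.1 := by
      rw [PySem.Dict.contains_eq_decide_mem_keys, PySem.Dict.contains_eq_decide_mem_keys, hkeys]
    by_cases hc : dB.contains q.1 = true
    · rw [PySem.Dict.items_insert_of_contains _ _ (hcont.trans hc),
          PySem.Dict.items_insert_of_contains _ _ hc, h, List.map_map, List.map_map]
      apply List.map_congr_left
      intro p _
      by_cases hp : p.1 = q.1
      · simp [Function.comp, hp]
      · simp [Function.comp, hp]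
    · have hc' : dA.contains q.1 = false := by rw [hcont]; simpa using hc
      rw [PySem.Dict.items_insert_of_not_contains _ _ hc',
          PySem.Dict.items_insert_of_not_contains _ _ (by simpa using hc), h, List.map_append]
      rfl

lemma chain_eq_passes (p : String × String) (hp : p.2 = "3-5 days (custom implementation)") :
    passEntry "confidence" "1-2 days (simple filter)"
      (passEntry "delta" "2-3 days (threshold tuning)"
        (passEntry "pattern" "1 week (pattern recognition)"
          (passEntry "ensemble" "3-5 days (consensus logic)"
            (passEntry "timeframe" "1 week (multi-timeframe analysis)" p))))
      = (p.1, chainTimeline p.1) := by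
  obtain ⟨n, v⟩ := p
  simp only at hp
  subst hp
  unfold passEntry chainTimeline
  by_cases h1 : PySem.Str.isIn "confidence" (PySem.Str.lower n) = true <;>
    by_cases h2 : PySem.Str.isIn "delta" (PySem.Str.lower n) = true <;>
      by_cases h3 : PySem.Str.isIn "pattern" (PySem.Str.lower n) = true <;>
        by_cases h4 : PySem.Str.isIn "ensemble" (PySem.Str.lower n) = true <;>
          by_cases h5 : PySem.Str.isIn "timeframe" (PySem.Str.lower n) = true <;>
            simp_all

lemma const_values (v0 : String) :
    ∀ (ss : List (String × (List (String × String)))) (d : PySem.Dict String String),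
      (∀ p ∈ d.items, p.2 = v0) →
      ∀ p ∈ (ss.foldl (fun d q => d.insert q.1 v0) d).items, p.2 = v0 := by
  intro ss
  induction ss with
  | nil => intro d h; simpa using h
  | cons q rest ih =>
    intro d h
    simp only [List.foldl_cons]
    apply ih
    intro p hp
    rcases (PySem.Dict.mem_items_insert ..).1 hp with h1 | h2
    · rw [h1]
    · exact h p h2.1

-- ===== VERDICT (by name: the statement is the Claim_ definition above) =====
theorem estimate_implementation_timeline_py_spec : Claim_equal_estimate_implementation_timeline_py := by
  intro ss _
  unfold Spec_estimate_implementation_timeline_py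
  unfold estimate_implementation_timeline_py estimate_implementation_timeline_py_alt
  -- name the default dict of B
  set d0 := ss.foldl
    (fun (d : PySem.Dict String String) p => d.insert p.1 "3-5 days (custom implementation)")
    PySem.Dict.empty with hd0
  -- A's loop body is insert of chainTimeline
  have hA : (ss.foldl
      (fun (timelines : PySem.Dict String String) p =>
        let name := p.1
        let _complexity := PySem.Dict.getD (PySem.Dict.ofList p.2) "implementation" ""
        if PySem.Str.isIn "confidence" (PySem.Str.lower name) then
          timelines.insert name "1-2 days (simple filter)"
        else if PySem.Str.isIn "delta" (PySem.Str.lower name) then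
          timelines.insert name "2-3 days (threshold tuning)"
        else if PySem.Str.isIn "pattern" (PySem.Str.lower name) then
          timelines.insert name "1 week (pattern recognition)"
        else if PySem.Str.isIn "ensemble" (PySem.Str.lower name) then
          timelines.insert name "3-5 days (consensus logic)"
        else if PySem.Str.isIn "timeframe" (PySem.Str.lower name) then
          timelines.insert name "1 week (multi-timeframe analysis)"
        else
          timelines.insert name "3-5 days (custom implementation)")
      PySem.Dict.empty).items
      = (ss.foldl (fun (d : PySem.Dict String String) p => d.insert p.1 (chainTimeline p.1))
          PySem.Dict.empty).items := by
    congr 1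
    apply List.foldl_ext
    intro d p _
    simp only [chainTimeline, apply_ite (PySem.Dict.insert d p.1)]
  rw [hA, AB_items chainTimeline "3-5 days (custom implementation)" ss
        PySem.Dict.empty PySem.Dict.empty (by rfl)]
  -- nodup keys through the passes
  have hnd0 : d0.keys.Nodup := by
    have := PySem.Dict.nodup_keys_foldl_insert_key ss (fun p => p.1)
      (fun _ _ => "3-5 days (custom implementation)") PySem.Dict.empty
      (PySem.Dict.nodup_keys_empty (κ := String) (ν := String))
    simpa [hd0] using this
  have hval0 : ∀ p ∈ d0.items, p.2 = "3-5 days (custom implementation)" :=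
    const_values "3-5 days (custom implementation)" ss PySem.Dict.empty (by intro p hp; simp [PySem.Dict.empty] at hp)
  -- unfold B's five passes
  simp only [timelineTable, List.reverse_cons, List.reverse_nil, List.nil_append,
    List.cons_append, List.foldl_cons, List.foldl_nil]
  have h1 := pass_items "timeframe" "1 week (multi-timeframe analysis)" d0 hnd0
  have k1 := pass_keys "timeframe" "1 week (multi-timeframe analysis)" d0 hnd0
  set d1 := timelinePass "timeframe" "1 week (multi-timeframe analysis)" d0 with hd1
  have hnd1 : d1.keys.Nodup := by rw [k1]; exact hnd0
  have h2 := pass_items "ensemble" "3-5 days (consensus logic)" d1 hnd1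
  have k2 := pass_keys "ensemble" "3-5 days (consensus logic)" d1 hnd1
  set d2 := timelinePass "ensemble" "3-5 days (consensus logic)" d1 with hd2
  have hnd2 : d2.keys.Nodup := by rw [k2]; exact hnd1
  have h3 := pass_items "pattern" "1 week (pattern recognition)" d2 hnd2
  have k3 := pass_keys "pattern" "1 week (pattern recognition)" d2 hnd2
  set d3 := timelinePass "pattern" "1 week (pattern recognition)" d2 with hd3
  have hnd3 : d3.keys.Nodup := by rw [k3]; exact hnd2
  have h4 := pass_items "delta" "2-3 days (threshold tuning)" d3 hnd3
  have k4 := pass_keys "delta" "2-3 days (threshold tuning)" d3 hnd3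
  set d4 := timelinePass "delta" "2-3 days (threshold tuning)" d3 with hd4
  have hnd4 : d4.keys.Nodup := by rw [k4]; exact hnd3
  have h5 := pass_items "confidence" "1-2 days (simple filter)" d4 hnd4
  rw [h5, h4, h3, h2, h1, List.map_map, List.map_map, List.map_map, List.map_map]
  apply List.map_congr_left
  intro p hp
  simpa using (chain_eq_passes p (hval0 p hp)).symm
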